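-- pv_equiv track=rewrite | github.com/charbs123-sys/dukbill-web-page | AWS_lambda_async/processing_emails/main.py | retrieve_anonymized_threadids
-- ===== SOURCE A (Python) =====
-- def retrieve_anonymized_threadids(anonymized_emails):
--     """
--     Extract relevant threadids from anonymized emails
--     """
--     threadids = set()
--     relevant_bdc = {}
--     for classification in anonymized_emails:
--         if (classification.get("broker_document_category") != "NA"): #and
--             #classification.get("broker_document_category") != "Miscellaneous or Unclassified"):
--
--             threadids.add(classification["threadid"])
--
--             broker_doc_cat = classification["broker_document_category"]
--             if broker_doc_cat not in relevant_bdc: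
--                 relevant_bdc[broker_doc_cat] = []
--             relevant_bdc[broker_doc_cat].append(classification["threadid"])
--
--     return threadids, relevant_bdc
-- ===== SOURCE B (Python) =====
-- def retrieve_anonymized_threadids(anonymized_emails):
--     """
--     Extract relevant threadids from anonymized emails
--     """
--     threadids = {c["threadid"] for c in anonymized_emails
--                  if c.get("broker_document_category") != "NA"}
--     categories = list(dict.fromkeys(
--         c["broker_document_category"] for c in anonymized_emails
--         if c.get("broker_document_category") != "NA"))
--     relevant_bdc = {cat: [c["threadid"] for c in anonymized_emails
--                           if c.get("broker_document_category") == cat]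
--                     for cat in categories}
--     return threadids, relevant_bdc
-- ===== Notes on version B (the rewrite author's own statement) =====
-- stated objective: alternative
-- what changed: A builds the set and the grouping dict incrementally in one combined loop with explicit membership tests and in-place appends; B is a declarative group-by: it computes the threadid set and the ordered distinct categories as comprehensions, then builds each category's list by a separate full rescan of the input filtered on that category (O(n*k) rescans instead of A's single O(n) incremental pass).
import Mathlib
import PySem

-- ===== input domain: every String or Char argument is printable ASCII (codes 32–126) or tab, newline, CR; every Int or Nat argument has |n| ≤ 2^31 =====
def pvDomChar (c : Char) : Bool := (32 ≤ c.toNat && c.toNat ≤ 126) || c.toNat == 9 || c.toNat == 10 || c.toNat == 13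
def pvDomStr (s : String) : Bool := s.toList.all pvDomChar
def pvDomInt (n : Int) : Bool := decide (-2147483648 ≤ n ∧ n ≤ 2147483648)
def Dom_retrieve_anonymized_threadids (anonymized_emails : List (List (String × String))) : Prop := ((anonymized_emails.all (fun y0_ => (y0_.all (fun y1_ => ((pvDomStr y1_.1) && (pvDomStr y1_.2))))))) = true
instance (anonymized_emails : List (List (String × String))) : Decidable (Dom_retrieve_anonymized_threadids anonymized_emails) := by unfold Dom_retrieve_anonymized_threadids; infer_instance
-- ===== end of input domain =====

-- B replaces A's single incremental loop by a declarative group-by: ordered distinct categories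
-- first, then one full rescan of the input per category; same results, O(n·k) instead of O(n).

-- ===== PORT A =====
-- A's combined loop: one fold carrying (threadids set, relevant_bdc dict).
-- '.getD ""' ports classification["k"]: the KeyError case (none) is excluded by Pre_.
def retrieve_anonymized_threadids (anonymized_emails : List (List (String × String))) : List String × (List (String × List String)) :=
  let res := anonymized_emails.foldl
    (fun (st : PySem.Set String × PySem.Dict String (List String)) c =>
      let cd := PySem.Dict.mk c
      if cd.get? "broker_document_category" ≠ some "NA" then
        let tids := PySem.Set.add st.1 ((cd.get? "threadid").getD "")
        let bdc := (cd.get? "broker_document_category").getD ""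
        let d := if st.2.contains bdc then st.2 else st.2.insert bdc []
        (tids, d.modify bdc [] (· ++ [(cd.get? "threadid").getD ""]))
      else st)
    (PySem.Set.empty, PySem.Dict.empty)
  (res.1, res.2.items)

-- ===== PORT B =====
-- B's group-by: the threadid set, the ordered distinct categories (dict.fromkeys), then one
-- filtered rescan of the whole input per category (the dict comprehension = insert per key).
def retrieve_anonymized_threadids_alt (anonymized_emails : List (List (String × String))) : List String × (List (String × List String)) :=
  let threadids := PySem.Set.ofList
    ((anonymized_emails.filter
        (fun c => !((PySem.Dict.mk c).get? "broker_document_category" == some "NA"))).map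
      (fun c => ((PySem.Dict.mk c).get? "threadid").getD ""))
  let categories := PySem.List.dedup
    ((anonymized_emails.filter
        (fun c => !((PySem.Dict.mk c).get? "broker_document_category" == some "NA"))).map
      (fun c => ((PySem.Dict.mk c).get? "broker_document_category").getD ""))
  let relevant_bdc := categories.foldl
    (fun (d : PySem.Dict String (List String)) cat =>
      d.insert cat
        ((anonymized_emails.filter
            (fun c => (PySem.Dict.mk c).get? "broker_document_category" == some cat)).map
          (fun c => ((PySem.Dict.mk c).get? "threadid").getD "")))
    PySem.Dict.empty
  (threadids, relevant_bdc.items)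

-- ===== PRECONDITION & SPEC =====
-- Pre_ excludes exactly the inputs where A raises KeyError: a classification whose
-- broker_document_category is missing or ≠ "NA" while it lacks "threadid" (or the category itself).
def Pre_retrieve_anonymized_threadids (anonymized_emails : List (List (String × String))) : Prop :=
  ∀ c ∈ anonymized_emails,
    (PySem.Dict.mk c).get? "broker_document_category" ≠ some "NA" →
      ((PySem.Dict.mk c).get? "broker_document_category").isSome ∧
      ((PySem.Dict.mk c).get? "threadid").isSome
instance (anonymized_emails : List (List (String × String))) : Decidable (Pre_retrieve_anonymized_threadids anonymized_emails) := by unfold Pre_retrieve_anonymized_threadids; infer_instance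

def pvWitness_retrieve_anonymized_threadids : (List (List (String × String))) :=
  [[("broker_document_category", "Invoice"), ("threadid", "t1")],
   [("broker_document_category", "NA"), ("threadid", "t2")],
   [("broker_document_category", "Invoice"), ("threadid", "t3")]]

def Spec_retrieve_anonymized_threadids (anonymized_emails : List (List (String × String))) (out : List String × (List (String × List String))) : Prop := out = retrieve_anonymized_threadids_alt anonymized_emails
instance (anonymized_emails : List (List (String × String))) (out : List String × (List (String × List String))) : Decidable (Spec_retrieve_anonymized_threadids anonymized_emails out) := by unfold Spec_retrieve_anonymized_threadids; infer_instance

-- ===== CLAIM (what is proved, stated in full; the proofs are below) =====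
def Claim_equal_retrieve_anonymized_threadids : Prop := ∀ (anonymized_emails : List (List (String × String))), Dom_retrieve_anonymized_threadids anonymized_emails → Pre_retrieve_anonymized_threadids anonymized_emails → Spec_retrieve_anonymized_threadids anonymized_emails (retrieve_anonymized_threadids anonymized_emails)

-- ===== LEMMAS AND PROOFS =====

-- A's in-loop "if missing: []; then append" step is one plain modify step.
lemma step_modify (d : PySem.Dict String (List String)) (k : String) (v : String) :
    (if d.contains k then d else d.insert k []).modify k [] (· ++ [v])
    = d.modify k [] (· ++ [v]) := by
  by_cases hc : d.contains k = true
  · rw [if_pos hc]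
  · have hcf : d.contains k = false := by simpa using hc
    rw [if_neg (by simp [hcf])]
    have h4 : d.getD k [] = [] := PySem.Dict.getD_of_not_contains d [] hcf
    simp only [PySem.Dict.modify, PySem.Dict.getD_insert_self, h4, List.nil_append,
      PySem.Dict.insert_insert_self]

-- A's combined fold over the whole list equals two folds over the filtered projection.
lemma ab_fold (xs : List (List (String × String))) (tids : PySem.Set String)
    (d : PySem.Dict String (List String)) :
    xs.foldl
      (fun (st : PySem.Set String × PySem.Dict String (List String)) c =>
        let cd := PySem.Dict.mk c
        if cd.get? "broker_document_category" ≠ some "NA" then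
          let tids := PySem.Set.add st.1 ((cd.get? "threadid").getD "")
          let bdc := (cd.get? "broker_document_category").getD ""
          let d := if st.2.contains bdc then st.2 else st.2.insert bdc []
          (tids, d.modify bdc [] (· ++ [(cd.get? "threadid").getD ""]))
        else st)
      (tids, d)
    = (((xs.filter (fun c => !((PySem.Dict.mk c).get? "broker_document_category" == some "NA"))).map
          (fun c => (((PySem.Dict.mk c).get? "broker_document_category").getD "",
                     ((PySem.Dict.mk c).get? "threadid").getD ""))).foldl
         (fun s p => PySem.Set.add s p.2) tids,
       ((xs.filter (fun c => !((PySem.Dict.mk c).get? "broker_document_category" == some "NA"))).map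
          (fun c => (((PySem.Dict.mk c).get? "broker_document_category").getD "",
                     ((PySem.Dict.mk c).get? "threadid").getD ""))).foldl
         (fun d p => d.modify p.1 [] (· ++ [p.2])) d) := by
  induction xs generalizing tids d with
  | nil => rfl
  | cons c rest ih =>
    rw [List.foldl_cons, List.filter_cons]
    by_cases h : (PySem.Dict.mk c).get? "broker_document_category" = some "NA"
    · have hb : (!((PySem.Dict.mk c).get? "broker_document_category" == some "NA")) = false := by
        simp [h]
      rw [hb]
      simp only [Bool.false_eq_true, if_false]
      have hA : ((PySem.Dict.mk c).get? "broker_document_category" ≠ some "NA") = False := by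
        simp [h]
      simp only [hA, if_false]
      exact ih tids d
    · have hb : (!((PySem.Dict.mk c).get? "broker_document_category" == some "NA")) = true := by
        simp [h]
      rw [hb]
      simp only [if_true, List.map_cons, List.foldl_cons]
      have hA : ((PySem.Dict.mk c).get? "broker_document_category" ≠ some "NA") = True := by
        simp [h]
      simp only [hA, if_true]
      rw [step_modify]
      exact ih _ _

-- Under Pre_, and for a category cat ≠ "NA", a record matches "category == cat" exactly when
-- it is non-NA with that category (the pointwise fact behind B's per-category rescan).
lemma filter_cond_eq (xs : List (List (String × String)))
    (hpre : Pre_retrieve_anonymized_threadids xs) (cat : String) (hcat : cat ≠ "NA") :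
    ∀ c ∈ xs,
      ((!((PySem.Dict.mk c).get? "broker_document_category" == some "NA")) &&
        (((PySem.Dict.mk c).get? "broker_document_category").getD "" == cat))
      = ((PySem.Dict.mk c).get? "broker_document_category" == some cat) := by
  intro c hc
  cases hg : (PySem.Dict.mk c).get? "broker_document_category" with
  | none =>
    exact absurd ((hpre c hc (by simp [hg])).1) (by simp [hg])
  | some s =>
    by_cases hs : s = cat
    · subst hs; simp [hcat]
    · simp [hs]

-- The per-category list A accumulates equals B's filtered rescan of the whole input.
lemma scan_eq (xs : List (List (String × String)))
    (hpre : Pre_retrieve_anonymized_threadids xs) (cat : String) (hcat : cat ≠ "NA") :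
    ((((xs.filter (fun c => !((PySem.Dict.mk c).get? "broker_document_category" == some "NA"))).map
        (fun c => (((PySem.Dict.mk c).get? "broker_document_category").getD "",
                   ((PySem.Dict.mk c).get? "threadid").getD ""))).filter
      (fun p => p.1 == cat)).map (fun p => p.2))
    = (xs.filter (fun c => (PySem.Dict.mk c).get? "broker_document_category" == some cat)).map
        (fun c => ((PySem.Dict.mk c).get? "threadid").getD "") := by
  induction xs with
  | nil => rfl
  | cons c rest ih =>
    have ih' := ih (fun c' hc' => hpre c' (List.mem_cons_of_mem c hc'))
    have hcnd := filter_cond_eq (c :: rest) hpre cat hcat c (List.mem_cons_self)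
    rw [List.filter_cons, List.filter_cons]
    by_cases hP : (!((PySem.Dict.mk c).get? "broker_document_category" == some "NA")) = true
    · rw [if_pos hP]
      rw [List.map_cons, List.filter_cons]
      by_cases hm : (((PySem.Dict.mk c).get? "broker_document_category").getD "" == cat) = true
      · have : ((PySem.Dict.mk c).get? "broker_document_category" == some cat) = true := by
          rw [← hcnd, hP, hm]; rfl
        rw [if_pos hm, if_pos this, List.map_cons, List.map_cons, ih']
      · have : ((PySem.Dict.mk c).get? "broker_document_category" == some cat) = false := by
          rw [← hcnd, hP]; simpa using hm
        rw [if_neg (by simp [hm]), if_neg (by simp [this]), ih']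
    · have hPf : (!((PySem.Dict.mk c).get? "broker_document_category" == some "NA")) = false := by
        simpa using hP
      have : ((PySem.Dict.mk c).get? "broker_document_category" == some cat) = false := by
        rw [← hcnd, hPf]; rfl
      rw [if_neg (by simp [hPf]), if_neg (by simp [this]), ih']

-- A category appearing in B's dedup list is some record's non-NA category, hence ≠ "NA".
lemma cat_ne_NA (xs : List (List (String × String)))
    (hpre : Pre_retrieve_anonymized_threadids xs) (cat : String)
    (hcat : cat ∈ PySem.List.dedup
      ((xs.filter (fun c => !((PySem.Dict.mk c).get? "broker_document_category" == some "NA"))).map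
        (fun c => ((PySem.Dict.mk c).get? "broker_document_category").getD ""))) :
    cat ≠ "NA" := by
  rw [PySem.List.mem_dedup] at hcat
  obtain ⟨c, hc, hcv⟩ := List.mem_map.mp hcat
  have hcx := List.mem_filter.mp hc
  have hP := hcx.2
  cases hg : (PySem.Dict.mk c).get? "broker_document_category" with
  | none => exact absurd ((hpre c hcx.1 (by simp [hg])).1) (by simp [hg])
  | some s =>
    rw [hg] at hP hcv
    simp only [Option.getD_some] at hcv
    subst hcv
    simpa using hP

-- ===== VERDICT (by name: the statement is the Claim_ definition above) =====
theorem retrieve_anonymized_threadids_spec : Claim_equal_retrieve_anonymized_threadids := by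
  intro xs _ hpre
  unfold Spec_retrieve_anonymized_threadids retrieve_anonymized_threadids retrieve_anonymized_threadids_alt
  rw [ab_fold]
  rw [Prod.mk.injEq]
  constructor
  · -- set component
    simp only [PySem.Set.ofList_eq_foldl, List.foldl_map]
    rfl
  · -- dict component
    have hkeys : ((((xs.filter (fun c => !((PySem.Dict.mk c).get? "broker_document_category" == some "NA"))).map
          (fun c => (((PySem.Dict.mk c).get? "broker_document_category").getD "",
                     ((PySem.Dict.mk c).get? "threadid").getD ""))).foldl
        (fun d p => d.modify p.1 [] (· ++ [p.2])) PySem.Dict.empty)).keys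
        = PySem.List.dedup
            ((xs.filter (fun c => !((PySem.Dict.mk c).get? "broker_document_category" == some "NA"))).map
              (fun c => ((PySem.Dict.mk c).get? "broker_document_category").getD "")) := by
      rw [PySem.Dict.keys_foldl_modify_key _ Prod.fst [] (fun _ p => (· ++ [p.2])) PySem.Dict.empty]
      simp [PySem.Set.update, PySem.Set.ofList_eq_foldl, List.map_map, Function.comp_def,
        PySem.Dict.keys_empty]
    have hnd : ((((xs.filter (fun c => !((PySem.Dict.mk c).get? "broker_document_category" == some "NA"))).map
          (fun c => (((PySem.Dict.mk c).get? "broker_document_category").getD "",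
                     ((PySem.Dict.mk c).get? "threadid").getD ""))).foldl
        (fun d p => d.modify p.1 [] (· ++ [p.2])) PySem.Dict.empty)).keys.Nodup := by
      apply PySem.Dict.nodup_keys_foldl_modify_key _ Prod.fst [] (fun _ p => (· ++ [p.2]))
      simp [PySem.Dict.keys_empty]
    rw [PySem.Dict.items_eq_map_keys _ hnd [], hkeys]
    rw [PySem.Dict.items_foldl_insert_fresh _ (fun cat => cat)
        (fun cat => (xs.filter (fun c => (PySem.Dict.mk c).get? "broker_document_category" == some cat)).map
          (fun c => ((PySem.Dict.mk c).get? "threadid").getD "")) PySem.Dict.empty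
        (fun a _ => PySem.Dict.contains_empty a)
        (by simpa using PySem.List.nodup_dedup _)]
    have hempty : (PySem.Dict.empty : PySem.Dict String (List String)).items = [] := rfl
    rw [hempty, List.nil_append]
    apply List.map_congr_left
    intro cat hcat
    have hne := cat_ne_NA xs hpre cat hcat
    congr 1
    rw [PySem.Dict.getD_foldl_modify_append]
    have hged : (PySem.Dict.empty : PySem.Dict String (List String)).getD cat [] = [] := rfl
    rw [hged, List.nil_append, scan_eq xs hpre cat hne]
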